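-- pv_equiv track=rewrite | github.com/The-Samael/CodeSignal | 8 - matrixElementsSum.py | matrixElementsSum
-- ===== SOURCE A (Python) =====
-- def matrixElementsSum(matrix):
--     sum = 0
--     for i in range(1,len(matrix)):
--         for j in range(len(matrix[i])):
--             if matrix[i - 1][j] == 0:
--                 matrix[i][j] = 0
--     for i in matrix:
--         for j in i:
--             sum += j
--     return sum
-- ===== SOURCE B (Python) =====
-- def matrixElementsSum(matrix):
--     total = 0
--     dead = set()
--     for row in matrix:
--         for j, v in enumerate(row):
--             if j in dead or v == 0:
--                 dead.add(j)
--             else: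
--                 total += v
--     return total
-- ===== Notes on version B (the rewrite author's own statement) =====
-- stated objective: simpler
-- what changed: Replaces A's two phases (index-based in-place zero-propagation pass over the matrix followed by a full second pass summing every cell) with a single row-wise pass that keeps a set of blocked column indices and accumulates the total directly, without mutating the matrix.
import Mathlib
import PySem

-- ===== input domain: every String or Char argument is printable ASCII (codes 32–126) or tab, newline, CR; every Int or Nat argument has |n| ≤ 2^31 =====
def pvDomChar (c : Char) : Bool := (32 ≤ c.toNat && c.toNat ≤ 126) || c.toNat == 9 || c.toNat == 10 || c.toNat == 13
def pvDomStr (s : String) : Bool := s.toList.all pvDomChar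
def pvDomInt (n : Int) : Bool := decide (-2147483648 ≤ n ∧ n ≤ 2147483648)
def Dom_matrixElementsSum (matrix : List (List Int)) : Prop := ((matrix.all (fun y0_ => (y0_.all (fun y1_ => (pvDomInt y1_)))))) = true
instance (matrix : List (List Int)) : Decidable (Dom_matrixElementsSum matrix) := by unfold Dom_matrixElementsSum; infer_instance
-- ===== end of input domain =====

-- B replaces A's two passes (in-place zero-propagation, then a full summing re-scan) by a single
-- pass with a set of blocked column indices; equivalence is about the RETURN value only (A zeroes
-- cells of its argument in place, B does not mutate it).


-- ===== PORT A =====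
-- body of A's first loop: 'for j in range(len(matrix[i])): if matrix[i-1][j] == 0: matrix[i][j] = 0'
def stepA (m : List (List Int)) (i : Int) : List (List Int) :=
  (PySem.List.pyRange 0 ((PySem.List.pyGetD m i []).length : Int)).foldl
    (fun m j =>
      if PySem.List.pyGetD (PySem.List.pyGetD m (i - 1) []) j 1 == 0 then
        m.set i.toNat ((PySem.List.pyGetD m i []).set j.toNat 0)
      else m) m

def matrixElementsSum (matrix : List (List Int)) : Int :=
  let m := (PySem.List.pyRange 1 (matrix.length : Int)).foldl stepA matrix
  m.foldl (fun s r => r.foldl (fun s v => s + v) s) 0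

-- ===== PORT B =====
-- body of B's loop: 'for j, v in enumerate(row): if j in dead or v == 0: dead.add(j) else: total += v'
def stepB (st : Int × PySem.Set Int) (row : List Int) : Int × PySem.Set Int :=
  (PySem.List.enumerate row 0).foldl
    (fun st p =>
      if PySem.Set.contains st.2 p.1 || p.2 == 0 then (st.1, PySem.Set.add st.2 p.1)
      else (st.1 + p.2, st.2)) st

def matrixElementsSum_alt (matrix : List (List Int)) : Int :=
  (matrix.foldl stepB ((0 : Int), (PySem.Set.empty : PySem.Set Int))).1

-- ===== PRECONDITION & SPEC =====
-- A raises IndexError (reading matrix[i-1][j]) exactly when some row is longer than the row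
-- above it; Pre_ admits exactly the inputs on which A returns: row lengths non-increasing.
def Pre_matrixElementsSum (matrix : List (List Int)) : Prop :=
  List.IsChain (fun r s => s.length ≤ r.length) matrix
instance (matrix : List (List Int)) : Decidable (Pre_matrixElementsSum matrix) := by
  unfold Pre_matrixElementsSum; infer_instance
def pvWitness_matrixElementsSum : List (List Int) := [[1, 0, 3], [4, 5, 6], [7, 8]]

def Spec_matrixElementsSum (matrix : List (List Int)) (out : Int) : Prop := out = matrixElementsSum_alt matrix
instance (matrix : List (List Int)) (out : Int) : Decidable (Spec_matrixElementsSum matrix out) := by unfold Spec_matrixElementsSum; infer_instance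

-- ===== CLAIM (what is proved, stated in full; the proofs are below) =====
def Claim_equal_matrixElementsSum : Prop := ∀ (matrix : List (List Int)), Dom_matrixElementsSum matrix → Pre_matrixElementsSum matrix → Spec_matrixElementsSum matrix (matrixElementsSum matrix)

-- ===== LEMMAS AND PROOFS =====

-- the row obtained from cur (sitting at offset s) by zeroing entries below a zero of prev
def zrowOff (prev : List Int) : Nat → List Int → List Int
  | _, [] => []
  | s, v :: cur => (if prev.getD s 1 = 0 then 0 else v) :: zrowOff prev (s + 1) cur

theorem length_zrowOff (prev : List Int) (s : Nat) (cur : List Int) :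
    (zrowOff prev s cur).length = cur.length := by
  induction cur generalizing s with
  | nil => rfl
  | cons v cur ih => simp [zrowOff, ih]

theorem getD_zrowOff (prev : List Int) (s : Nat) (cur : List Int) (j : Nat)
    (hj : j < cur.length) :
    (zrowOff prev s cur).getD j 1 = if prev.getD (s + j) 1 = 0 then 0 else cur.getD j 1 := by
  induction cur generalizing s j with
  | nil => simp at hj
  | cons v cur ih =>
    cases j with
    | zero => simp [zrowOff]
    | succ j =>
      simp only [zrowOff, List.getD_cons_succ]
      rw [ih (s + 1) j (by simpa using hj)]
      have h : s + 1 + j = s + (j + 1) := by omega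
      rw [h]

theorem zrowOff_nil_prev (s : Nat) (cur : List Int) : zrowOff [] s cur = cur := by
  induction cur generalizing s with
  | nil => rfl
  | cons v cur ih => simp [zrowOff, List.getD, ih]

-- the matrix A's first phase produces, below a (already propagated) first row prev
def propD : List Int → List (List Int) → List (List Int)
  | _, [] => []
  | prev, r :: rs => zrowOff prev 0 r :: propD (zrowOff prev 0 r) rs

-- A's inner loop at i = 1 (state r0 :: (pre ++ cur) :: rs, pre already processed)
theorem inner_one (r0 : List Int) (cur : List Int) (s : Nat) (pre : List Int)
    (rs : List (List Int)) (hs : pre.length = s) :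
    (List.range' s cur.length).foldl
      (fun m j => if ((m.getD 0 []).getD j 1 = 0) then m.set 1 ((m.getD 1 []).set j 0) else m)
      (r0 :: (pre ++ cur) :: rs)
    = r0 :: (pre ++ zrowOff r0 s cur) :: rs := by
  induction cur generalizing s pre with
  | nil => simp [zrowOff]
  | cons v cur ih =>
    simp only [List.length_cons, List.range'_succ, List.foldl_cons,
      List.getD_cons_zero, List.getD_cons_succ]
    have hset : (pre ++ v :: cur).set s 0 = pre ++ (0 : Int) :: cur := by
      rw [← hs, List.set_append_right _ _ (le_refl _)]
      simp
    by_cases h : r0.getD s 1 = 0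
    · rw [if_pos h]
      have ih0 := ih (s + 1) (pre ++ [(0:Int)]) (by simp [hs])
      simp only [List.append_assoc, List.cons_append, List.nil_append] at ih0
      simp only [List.set, hset]
      rw [ih0]
      simp only [zrowOff]; rw [if_pos h]
    · rw [if_neg h]
      have ih0 := ih (s + 1) (pre ++ [v]) (by simp [hs])
      simp only [List.append_assoc, List.cons_append, List.nil_append] at ih0
      rw [ih0]
      simp only [zrowOff]; rw [if_neg h]

-- A's outer-loop body at i = 1
theorem stepA_one (r0 r : List Int) (rs : List (List Int)) :
    stepA (r0 :: r :: rs) 1 = r0 :: zrowOff r0 0 r :: rs := by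
  unfold stepA
  have h1 : PySem.List.pyGetD (r0 :: r :: rs) 1 [] = r := by
    have := PySem.List.pyGetD_natCast (r0 :: r :: rs) 1 []
    simpa using this
  rw [h1, PySem.List.pyRange_zero_natCast, List.foldl_map]
  have hb : ∀ (m : List (List Int)) (k : Nat),
      (if PySem.List.pyGetD (PySem.List.pyGetD m ((1:Int) - 1) []) ((k:Nat):Int) 1 == 0 then
         m.set (1:Int).toNat ((PySem.List.pyGetD m 1 []).set ((k:Nat):Int).toNat 0) else m)
      = (if ((m.getD 0 []).getD k 1 = 0) then m.set 1 ((m.getD 1 []).set k 0) else m) := by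
    intro m k
    have h0 : PySem.List.pyGetD m ((1:Int)-1) [] = m.getD 0 [] := by
      have := PySem.List.pyGetD_natCast m 0 []
      simpa using this
    have h2 : PySem.List.pyGetD m 1 [] = m.getD 1 [] := by
      have := PySem.List.pyGetD_natCast m 1 []
      simpa using this
    rw [h0, h2, PySem.List.pyGetD_natCast]
    simp
  simp only [hb]
  have := inner_one r0 r 0 [] rs rfl
  simpa [List.range_eq_range'] using this

theorem pyRange_shift (a b : Int) :
    PySem.List.pyRange (a + 1) (b + 1) = (PySem.List.pyRange a b).map (· + 1) := by
  by_cases h : a < b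
  · obtain ⟨n, hn⟩ : ∃ n : Nat, (b - a).toNat = n := ⟨_, rfl⟩
    induction n generalizing a with
    | zero => omega
    | succ n ih =>
      rw [PySem.List.pyRange_one_cons h, PySem.List.pyRange_one_cons (by omega)]
      simp only [List.map_cons]
      by_cases h' : a + 1 < b
      · rw [ih (a + 1) (by omega) (by omega)]
      · rw [PySem.List.pyRange_one_eq_nil (by omega), PySem.List.pyRange_one_eq_nil (by omega)]
        simp
  · rw [PySem.List.pyRange_one_eq_nil (by omega), PySem.List.pyRange_one_eq_nil (by omega)]
    simp

-- shifting A's outer-loop body down one row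
theorem stepA_cons (k : Nat) (hk : 1 ≤ k) (r0 : List Int) (m : List (List Int)) :
    stepA (r0 :: m) ((k : Int) + 1) = r0 :: stepA m (k : Int) := by
  unfold stepA
  have hrow : PySem.List.pyGetD (r0 :: m) ((k:Int) + 1) [] = PySem.List.pyGetD m (k:Int) [] := by
    have h1 : ((k:Int) + 1) = ((k+1 : Nat) : Int) := by push_cast; ring
    rw [h1, PySem.List.pyGetD_natCast, PySem.List.pyGetD_natCast]
    simp
  rw [hrow]
  apply List.foldl_hom (f := fun m => r0 :: m)
  intro x y
  have hprev : PySem.List.pyGetD (r0 :: x) ((k:Int) + 1 - 1) [] = PySem.List.pyGetD x ((k:Int) - 1) [] := by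
    have h1 : ((k:Int) + 1 - 1) = ((k : Nat) : Int) := by ring
    have h2 : ((k:Int) - 1) = ((k - 1 : Nat) : Int) := by omega
    rw [h1, h2, PySem.List.pyGetD_natCast, PySem.List.pyGetD_natCast]
    obtain ⟨k', rfl⟩ : ∃ k', k = k' + 1 := ⟨k - 1, by omega⟩
    simp
  have hcur : PySem.List.pyGetD (r0 :: x) ((k:Int) + 1) [] = PySem.List.pyGetD x (k:Int) [] := by
    have h1 : ((k:Int) + 1) = ((k+1 : Nat) : Int) := by push_cast; ring
    rw [h1, PySem.List.pyGetD_natCast, PySem.List.pyGetD_natCast]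
    simp
  have htn : ((k:Int) + 1).toNat = (k:Int).toNat + 1 := by omega
  rw [hprev, hcur, htn]
  by_cases hc : PySem.List.pyGetD (PySem.List.pyGetD x ((k:Int) - 1) []) y 1 == 0
  · simp only [hc, List.set]; simp
  · simp only [hc]; simp

theorem foldl_stepA_shift (l : List Int) (hl : ∀ i ∈ l, 1 ≤ i) (r0 : List Int)
    (m : List (List Int)) :
    l.foldl (fun m i => stepA m (i + 1)) (r0 :: m) = r0 :: l.foldl stepA m := by
  induction l generalizing m with
  | nil => rfl
  | cons i l ih =>
    simp only [List.foldl_cons]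
    have h1 : 1 ≤ i := hl i (by simp)
    obtain ⟨k, rfl⟩ : ∃ k : Nat, i = (k : Int) := ⟨i.toNat, by omega⟩
    rw [stepA_cons k (by exact_mod_cast h1)]
    exact ih (fun j hj => hl j (by simp [hj])) _

-- A's whole first phase
theorem phase1_eq (rs : List (List Int)) (r0 : List Int) :
    (PySem.List.pyRange 1 (((r0 :: rs).length : Nat) : Int)).foldl stepA (r0 :: rs)
      = r0 :: propD r0 rs := by
  induction rs generalizing r0 with
  | nil => rw [PySem.List.pyRange_one_eq_nil (by simp)]; rfl
  | cons r rs ih =>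
    have hlen : (((r0 :: r :: rs).length : Nat) : Int) = (((r :: rs).length : Nat) : Int) + 1 := by
      simp
    have hs := pyRange_shift 0 (((r :: rs).length : Nat) : Int)
    rw [zero_add] at hs
    rw [hlen, hs]
    rw [PySem.List.pyRange_one_cons (by exact_mod_cast Nat.pos_of_ne_zero (by simp)), List.map_cons, List.foldl_cons,
      List.foldl_map]
    rw [show (0 : Int) + 1 = 1 by ring, stepA_one]
    have hmem : ∀ i ∈ PySem.List.pyRange 1 ((((r :: rs).length : Nat)) : Int), 1 ≤ i := by
      intro i hi
      have := PySem.List.mem_pyRange_one.mp hi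
      omega
    rw [foldl_stepA_shift _ hmem]
    have hL : (((zrowOff r0 0 r :: rs).length : Nat) : Int) = (((r :: rs).length : Nat) : Int) := by
      simp
    rw [← hL, ih (zrowOff r0 0 r)]
    rfl

-- A's summing phase
theorem sumAll_eq (m : List (List Int)) (a : Int) :
    m.foldl (fun s r => r.foldl (fun s v => s + v) s) a = a + (m.map List.sum).sum := by
  induction m generalizing a with
  | nil => simp
  | cons r m ih =>
    simp only [List.foldl_cons, List.map_cons, List.sum_cons]
    rw [PySem.List.foldl_add r (fun v => v), ih]
    simp
    ring

-- B's inner loop over one row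
theorem innerB_lemma (prev : List Int) (cur : List Int) (s : Nat) (total : Int)
    (dead : PySem.Set Int)
    (hd : ∀ j : Nat, s ≤ j → j < s + cur.length → (((j : Int) ∈ dead) ↔ prev.getD j 1 = 0)) :
    (((PySem.List.enumerate cur (s : Int)).foldl
        (fun st p =>
          if PySem.Set.contains st.2 p.1 || p.2 == 0 then (st.1, PySem.Set.add st.2 p.1)
          else (st.1 + p.2, st.2)) (total, dead)).1
      = total + (zrowOff prev s cur).sum) ∧
    (∀ x : Int, x ∈ ((PySem.List.enumerate cur (s : Int)).foldl
        (fun st p =>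
          if PySem.Set.contains st.2 p.1 || p.2 == 0 then (st.1, PySem.Set.add st.2 p.1)
          else (st.1 + p.2, st.2)) (total, dead)).2
      ↔ x ∈ dead ∨ ∃ j : Nat, s ≤ j ∧ j < s + cur.length ∧ x = (j : Int) ∧
          (prev.getD j 1 = 0 ∨ cur.getD (j - s) 1 = 0)) := by
  induction cur generalizing s total dead with
  | nil =>
    simp [PySem.List.enumerate, zrowOff]
    omega
  | cons v cur ih =>
    rw [PySem.List.enumerate_cons]
    simp only [List.foldl_cons]
    have hds : ((s : Int) ∈ dead) ↔ prev.getD s 1 = 0 := hd s (le_refl _) (by simp)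
    have hcond : (PySem.Set.contains dead (s : Int) || (v == 0))
        = decide (prev.getD s 1 = 0 ∨ v = 0) := by
      by_cases h1 : prev.getD s 1 = 0
      · simp [hds.mpr h1]
        exact Or.inl h1
      · have hnm : ¬ ((s:Int) ∈ dead) := fun hm => h1 (hds.mp hm)
        by_cases h2 : v = 0
        · simp [h2]
        · have h1' : ¬ prev[s]?.getD 1 = 0 := by simpa [List.getD_eq_getElem?_getD] using h1
          simp [hnm, h1', h2]
    rw [hcond]
    have hcast : ((s:Int) + 1) = ((s+1 : Nat) : Int) := by push_cast; ring
    by_cases h : prev.getD s 1 = 0 ∨ v = 0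
    · rw [decide_eq_true h, if_pos rfl]
      have hd' : ∀ j : Nat, s+1 ≤ j → j < (s+1) + cur.length →
          (((j : Int) ∈ PySem.Set.add dead (s:Int)) ↔ prev.getD j 1 = 0) := by
        intro j hj1 hj2
        rw [PySem.Set.mem_add]
        have hne : ((j:Int)) ≠ (s:Int) := by exact_mod_cast (by omega : j ≠ s)
        constructor
        · rintro (hm | hm)
          · exact (hd j (by omega) (by simp; omega)).mp hm
          · exact absurd hm hne
        · intro hp
          exact Or.inl ((hd j (by omega) (by simp; omega)).mpr hp)
      rw [hcast]
      obtain ⟨ih1, ih2⟩ := ih (s+1) total (PySem.Set.add dead (s:Int)) hd'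
      constructor
      · rw [ih1]
        have hw : (if prev.getD s 1 = 0 then (0:Int) else v) = 0 := by
          rcases h with h | h
          · rw [if_pos h]
          · rw [h, ite_self]
        simp only [zrowOff, List.sum_cons, hw]
        ring
      · intro x
        rw [ih2 x, PySem.Set.mem_add]
        constructor
        · rintro ((hm | rfl) | ⟨j, hj1, hj2, rfl, hc⟩)
          · exact Or.inl hm
          · exact Or.inr ⟨s, le_refl _, by simp, rfl, by simp only [Nat.sub_self, List.getD_cons_zero]; exact h⟩
          · refine Or.inr ⟨j, by omega, by simp; omega, rfl, ?_⟩
            rcases hc with hc | hc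
            · exact Or.inl hc
            · right
              have hjs : j - s = (j - (s+1)) + 1 := by omega
              rw [hjs, List.getD_cons_succ]
              exact hc
        · rintro (hm | ⟨j, hj1, hj2, rfl, hc⟩)
          · exact Or.inl (Or.inl hm)
          · by_cases hjs : j = s
            · subst hjs
              exact Or.inl (Or.inr rfl)
            · refine Or.inr ⟨j, by omega, by simp at hj2 ⊢; omega, rfl, ?_⟩
              rcases hc with hc | hc
              · exact Or.inl hc
              · right
                have hjs' : j - s = (j - (s+1)) + 1 := by omega
                rw [hjs', List.getD_cons_succ] at hc
                exact hc
    · rw [decide_eq_false h]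
      rw [not_or] at h
      have hd' : ∀ j : Nat, s+1 ≤ j → j < (s+1) + cur.length →
          (((j : Int) ∈ dead) ↔ prev.getD j 1 = 0) := by
        intro j hj1 hj2
        exact hd j (by omega) (by simp; omega)
      rw [if_neg (by simp)]
      rw [hcast]
      obtain ⟨ih1, ih2⟩ := ih (s+1) (total + v) dead hd'
      constructor
      · rw [ih1]
        simp only [zrowOff, if_neg h.1, List.sum_cons]
        ring
      · intro x
        rw [ih2 x]
        constructor
        · rintro (hm | ⟨j, hj1, hj2, rfl, hc⟩)
          · exact Or.inl hm
          · refine Or.inr ⟨j, by omega, by simp; omega, rfl, ?_⟩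
            rcases hc with hc | hc
            · exact Or.inl hc
            · right
              have hjs : j - s = (j - (s+1)) + 1 := by omega
              rw [hjs, List.getD_cons_succ]
              exact hc
        · rintro (hm | ⟨j, hj1, hj2, rfl, hc⟩)
          · exact Or.inl hm
          · by_cases hjs : j = s
            · subst hjs
              simp at hc
              rcases hc with hc | hc
              · exact absurd hc h.1
              · exact absurd hc h.2
            · refine Or.inr ⟨j, by omega, by simp at hj2 ⊢; omega, rfl, ?_⟩
              rcases hc with hc | hc
              · exact Or.inl hc
              · right
                have hjs' : j - s = (j - (s+1)) + 1 := by omega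
                rw [hjs', List.getD_cons_succ] at hc
                exact hc

-- B's outer loop below an already-propagated row prev
theorem stepB_fold (rows : List (List Int)) (prev : List Int) (total : Int)
    (dead : PySem.Set Int)
    (hch : List.IsChain (fun r s => s.length ≤ r.length) (prev :: rows))
    (hd : ∀ j : Nat, j < prev.length → (((j : Int) ∈ dead) ↔ prev.getD j 1 = 0)) :
    (rows.foldl stepB (total, dead)).1 = total + ((propD prev rows).map List.sum).sum := by
  induction rows generalizing prev total dead with
  | nil => simp [propD]
  | cons r rows ih =>
    rw [List.isChain_cons_cons] at hch
    obtain ⟨hlen, hch⟩ := hch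
    simp only [List.foldl_cons]
    have hd0 : ∀ j : Nat, 0 ≤ j → j < 0 + r.length → (((j : Int) ∈ dead) ↔ prev.getD j 1 = 0) := by
      intro j _ hj
      exact hd j (by omega)
    obtain ⟨h1, h2⟩ := innerB_lemma prev r 0 total dead hd0
    simp only [Nat.cast_zero] at h1 h2
    have hstep : stepB (total, dead) r
        = ((PySem.List.enumerate r (0:Int)).foldl
            (fun st p =>
              if PySem.Set.contains st.2 p.1 || p.2 == 0 then (st.1, PySem.Set.add st.2 p.1)
              else (st.1 + p.2, st.2)) (total, dead)) := rfl
    have hd' : ∀ j : Nat, j < (zrowOff prev 0 r).length →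
        (((j : Int) ∈ (stepB (total, dead) r).2) ↔ (zrowOff prev 0 r).getD j 1 = 0) := by
      intro j hj
      rw [length_zrowOff] at hj
      rw [hstep, h2, getD_zrowOff prev 0 r j hj]
      simp only [Nat.zero_add]
      constructor
      · rintro (hm | ⟨j', _, hj', heq, hc⟩)
        · have hz := (hd j (by omega)).mp hm
          rw [if_pos hz]
        · have : j = j' := by exact_mod_cast heq
          subst this
          simp only [Nat.sub_zero] at hc
          rcases hc with hc | hc
          · rw [if_pos hc]
          · by_cases hp : prev.getD j 1 = 0
            · rw [if_pos hp]
            · rw [if_neg hp]; exact hc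
      · intro hz
        by_cases hp : prev.getD j 1 = 0
        · exact Or.inl ((hd j (by omega)).mpr hp)
        · rw [if_neg hp] at hz
          exact Or.inr ⟨j, by omega, by omega, rfl, Or.inr (by simpa using hz)⟩
    have hch' : List.IsChain (fun r s => s.length ≤ r.length) (zrowOff prev 0 r :: rows) := by
      cases rows with
      | nil => simp
      | cons r' rows' =>
        rw [List.isChain_cons_cons] at hch ⊢
        exact ⟨by rw [length_zrowOff]; exact hch.1, hch.2⟩
    have hpair : stepB (total, dead) r
        = ((stepB (total, dead) r).1, (stepB (total, dead) r).2) := rfl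
    rw [hpair]
    rw [ih (zrowOff prev 0 r) _ _ hch' hd']
    rw [hstep, h1]
    simp [propD]
    ring

-- ===== VERDICT (by name: the statement is the Claim_ definition above) =====
theorem matrixElementsSum_spec : Claim_equal_matrixElementsSum := by
  intro matrix _ hpre
  unfold Spec_matrixElementsSum
  cases matrix with
  | nil => rfl
  | cons r0 rs =>
    unfold matrixElementsSum matrixElementsSum_alt
    rw [phase1_eq, sumAll_eq]
    simp only [List.foldl_cons]
    have hd0 : ∀ j : Nat, 0 ≤ j → j < 0 + r0.length →
        (((j : Int) ∈ (PySem.Set.empty : PySem.Set Int)) ↔ ([] : List Int).getD j 1 = 0) := by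
      intro j _ _
      simp [PySem.Set.empty, List.getD]
    obtain ⟨h1, h2⟩ := innerB_lemma ([] : List Int) r0 0 0 PySem.Set.empty hd0
    simp only [Nat.cast_zero] at h1 h2
    have hstep : stepB ((0:Int), (PySem.Set.empty : PySem.Set Int)) r0
        = ((stepB (0, PySem.Set.empty) r0).1, (stepB (0, PySem.Set.empty) r0).2) := rfl
    have hd1 : ∀ j : Nat, j < r0.length →
        (((j : Int) ∈ (stepB ((0:Int), (PySem.Set.empty : PySem.Set Int)) r0).2) ↔ r0.getD j 1 = 0) := by
      intro j hj
      rw [show (stepB ((0:Int), (PySem.Set.empty : PySem.Set Int)) r0).2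
          = ((PySem.List.enumerate r0 (0:Int)).foldl
              (fun st p =>
                if PySem.Set.contains st.2 p.1 || p.2 == 0 then (st.1, PySem.Set.add st.2 p.1)
                else (st.1 + p.2, st.2)) ((0:Int), PySem.Set.empty)).2 from rfl, h2]
      constructor
      · rintro (hm | ⟨j', _, hj', heq, hc⟩)
        · simp [PySem.Set.empty] at hm
        · have : j = j' := by exact_mod_cast heq
          subst this
          rcases hc with hc | hc
          · simp [List.getD] at hc
          · simpa using hc
      · intro hz
        exact Or.inr ⟨j, by omega, by omega, rfl, Or.inr (by simpa using hz)⟩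
    rw [hstep]
    rw [stepB_fold rs r0 _ _ hpre hd1]
    rw [show (stepB ((0:Int), (PySem.Set.empty : PySem.Set Int)) r0).1
        = ((PySem.List.enumerate r0 (0:Int)).foldl
            (fun st p =>
              if PySem.Set.contains st.2 p.1 || p.2 == 0 then (st.1, PySem.Set.add st.2 p.1)
              else (st.1 + p.2, st.2)) ((0:Int), PySem.Set.empty)).1 from rfl, h1]
    rw [zrowOff_nil_prev]
    simp
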